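-- pv_equiv track=rewrite | github.com/grzegorzmichrowski/ERP | crm/crm.py | get_longest_name_id
-- ===== SOURCE A (Python) =====
-- ID_INDEX = 1
--
-- NAME_INDEX = 2
--
-- def get_longest_name_id(table):
--     names_and_ids = {}
--     for line in table:  # go through every line and add to dict name as key and id as value
--         names_and_ids.update({line[NAME_INDEX]:line[ID_INDEX]})
--     names_list = list(names_and_ids) # creates list with names
--     max_name_length = max(len(name) for name in names_list) # length of the longest name
--     longest_length_names = [name for name in names_list if len(name) == max_name_length] # list of longest names
--     first_in_alphabet = longest_length_names[0]
--     for name in longest_length_names: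
--         if name < first_in_alphabet:
--             first_in_alphabet = name
--     id_ = names_and_ids[first_in_alphabet]
--     return id_
-- ===== SOURCE B (Python) =====
-- ID_INDEX = 1
--
-- NAME_INDEX = 2
--
-- def get_longest_name_id(table):
--     # Single reverse scan, no dict: walking backwards, the first occurrence of a
--     # name carries its final id, and a strict "better key" test never replaces the
--     # holder on an equal name, so last-id-wins is preserved automatically.
--     best_name = None
--     best_id = None
--     for line in reversed(table):
--         name = line[NAME_INDEX]
--         if (best_name is None
--                 or len(name) > len(best_name)
--                 or (len(name) == len(best_name) and name < best_name)):
--             best_name = name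
--             best_id = line[ID_INDEX]
--     if best_name is None:
--         raise ValueError("empty table")
--     return best_id
-- ===== Notes on version B (the rewrite author's own statement) =====
-- stated objective: alternative
-- what changed: A builds a name->id dict and then makes three passes over its keys (max length, filter to longest, manual alphabetical-min loop); B uses no dict at all: one reverse scan over the table with a best-(name,id) accumulator, where the strict better-key test keeps the first (i.e. last-in-table) id seen for the winning name.
import Mathlib
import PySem

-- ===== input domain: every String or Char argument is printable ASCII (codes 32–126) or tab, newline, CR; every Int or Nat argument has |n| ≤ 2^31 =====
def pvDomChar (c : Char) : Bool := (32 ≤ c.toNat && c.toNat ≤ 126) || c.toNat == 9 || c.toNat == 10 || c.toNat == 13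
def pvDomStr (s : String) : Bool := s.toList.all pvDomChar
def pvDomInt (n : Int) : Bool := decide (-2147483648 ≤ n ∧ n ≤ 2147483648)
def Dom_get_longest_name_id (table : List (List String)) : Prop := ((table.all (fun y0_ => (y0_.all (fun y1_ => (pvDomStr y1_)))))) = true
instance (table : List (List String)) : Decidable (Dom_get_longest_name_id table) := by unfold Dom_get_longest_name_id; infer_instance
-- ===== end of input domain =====

-- B drops A's dict and its three key passes entirely: one reverse scan over the table keeps a
-- best (name, id) accumulator; the strict better-key test never replaces the holder on an equal
-- name, so the first occurrence seen in reverse (= last in the table) supplies the id, as A's dict does.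

-- ===== PORT A =====
def get_longest_name_id (table : List (List String)) : String :=
  let names_and_ids : PySem.Dict String String := table.foldl
    (fun d line => d.update [(((PySem.List.pyGet? line 2).getD ""), ((PySem.List.pyGet? line 1).getD ""))])
    PySem.Dict.empty
  let names_list := names_and_ids.keys
  let max_name_length := (PySem.List.max? (names_list.map (fun name => PySem.Str.len name)) (fun x => x)).getD 0
  let longest_length_names := names_list.filter (fun name => PySem.Str.len name == max_name_length)
  let first0 := longest_length_names.head?.getD ""
  let first_in_alphabet := longest_length_names.foldl (fun f name => if name < f then name else f) first0
  (names_and_ids.get? first_in_alphabet).getD ""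

-- ===== PORT B =====
def get_longest_name_id_alt (table : List (List String)) : String :=
  let best := table.reverse.foldl
    (fun acc line =>
      let name := (PySem.List.pyGet? line 2).getD ""
      match acc with
      | none => some (name, (PySem.List.pyGet? line 1).getD "")
      | some (bn, bi) =>
        if PySem.Str.len bn < PySem.Str.len name ∨
            (PySem.Str.len name = PySem.Str.len bn ∧ name < bn) then
          some (name, (PySem.List.pyGet? line 1).getD "")
        else some (bn, bi))
    (none : Option (String × String))
  match best with
  | none => ""
  | some (_, i) => i

-- ===== PRECONDITION & SPEC =====
-- Pre_ excludes exactly the inputs on which Python A raises: an empty table (max() over an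
-- empty generator raises ValueError) and lines shorter than 3 entries (line[2] raises IndexError).
def Pre_get_longest_name_id (table : List (List String)) : Prop :=
  table ≠ [] ∧ ∀ line ∈ table, 3 ≤ line.length
instance (table : List (List String)) : Decidable (Pre_get_longest_name_id table) := by
  unfold Pre_get_longest_name_id; infer_instance
def pvWitness_get_longest_name_id : List (List String) := [["x", "7", "Bob"], ["y", "9", "Al"]]

def Spec_get_longest_name_id (table : List (List String)) (out : String) : Prop := out = get_longest_name_id_alt table
instance (table : List (List String)) (out : String) : Decidable (Spec_get_longest_name_id table out) := by unfold Spec_get_longest_name_id; infer_instance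

-- ===== CLAIM (what is proved, stated in full; the proofs are below) =====
def Claim_equal_get_longest_name_id : Prop := ∀ (table : List (List String)), Dom_get_longest_name_id table → Pre_get_longest_name_id table → Spec_get_longest_name_id table (get_longest_name_id table)

-- ===== LEMMAS AND PROOFS =====

-- the composite key both programs effectively minimise: longest first, then alphabetical
def pvKey (n : String) : Int ×ₗ String := toLex (-(PySem.Str.len n), n)

def pvName (line : List String) : String := (PySem.List.pyGet? line 2).getD ""
def pvId (line : List String) : String := (PySem.List.pyGet? line 1).getD ""
def pvPair (line : List String) : String × String := (pvName line, pvId line)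

theorem pvKey_lt_iff (x m : String) :
    pvKey x < pvKey m ↔
      (PySem.Str.len m < PySem.Str.len x ∨
       (PySem.Str.len x = PySem.Str.len m ∧ x < m)) := by
  unfold pvKey
  rw [Prod.Lex.toLex_lt_toLex]
  constructor
  · rintro (h | ⟨h1, h2⟩)
    · exact Or.inl (by omega)
    · exact Or.inr ⟨by omega, h2⟩
  · rintro (h | ⟨h1, h2⟩)
    · exact Or.inl (by omega)
    · exact Or.inr ⟨by omega, h2⟩

theorem pvKey_inj {a b : String} (h : pvKey a = pvKey b) : a = b := by
  have : (ofLex (pvKey a)).2 = (ofLex (pvKey b)).2 := by rw [h]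
  simpa [pvKey] using this

-- generic spec of a "keep the smaller key" fold
theorem minFold_spec {α β : Type} [LinearOrder β] (f : α → β) (xs : List α) (init : α) :
    ((xs.foldl (fun m x => if f x < f m then x else m) init) = init ∨
      (xs.foldl (fun m x => if f x < f m then x else m) init) ∈ xs) ∧
    f (xs.foldl (fun m x => if f x < f m then x else m) init) ≤ f init ∧
    ∀ y ∈ xs, f (xs.foldl (fun m x => if f x < f m then x else m) init) ≤ f y := by
  induction xs generalizing init with
  | nil => simp
  | cons a t ih =>
    simp only [List.foldl_cons, List.mem_cons]
    by_cases h : f a < f init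
    · simp only [if_pos h]
      obtain ⟨hmem, hle, hall⟩ := ih a
      refine ⟨?_, le_trans hle (le_of_lt h), ?_⟩
      · rcases hmem with h1 | h1
        · exact Or.inr (Or.inl h1)
        · exact Or.inr (Or.inr h1)
      · intro y hy
        rcases hy with rfl | hy
        · exact hle
        · exact hall y hy
    · simp only [if_neg h]
      obtain ⟨hmem, hle, hall⟩ := ih init
      refine ⟨?_, hle, ?_⟩
      · rcases hmem with h1 | h1
        · exact Or.inl h1
        · exact Or.inr (Or.inr h1)
      · intro y hy
        rcases hy with rfl | hy
        · exact le_trans hle (not_lt.mp h)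
        · exact hall y hy

-- B's fold with a some-accumulator is the key-min fold over the (name, id) pairs
theorem bfold_some (rs : List (List String)) (p : String × String) :
    rs.foldl
      (fun acc line =>
        let name := (PySem.List.pyGet? line 2).getD ""
        match acc with
        | none => some (name, (PySem.List.pyGet? line 1).getD "")
        | some (bn, bi) =>
          if PySem.Str.len bn < PySem.Str.len name ∨
              (PySem.Str.len name = PySem.Str.len bn ∧ name < bn) then
            some (name, (PySem.List.pyGet? line 1).getD "")
          else some (bn, bi))
      (some p) =
    some ((rs.map pvPair).foldl (fun m x => if pvKey x.1 < pvKey m.1 then x else m) p) := by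
  induction rs generalizing p with
  | nil => simp
  | cons a t ih =>
    obtain ⟨bn, bi⟩ := p
    by_cases h : PySem.Str.len bn < PySem.Str.len ((PySem.List.pyGet? a 2).getD "") ∨
        (PySem.Str.len ((PySem.List.pyGet? a 2).getD "") = PySem.Str.len bn ∧
          ((PySem.List.pyGet? a 2).getD "") < bn)
    · have h' : pvKey (pvPair a).1 < pvKey (bn, bi).1 := (pvKey_lt_iff _ _).mpr h
      simp only [List.foldl_cons, List.map_cons, if_pos h, if_pos h']
      exact ih _
    · have h' : ¬ pvKey (pvPair a).1 < pvKey (bn, bi).1 := fun hc => h ((pvKey_lt_iff _ _).mp hc)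
      simp only [List.foldl_cons, List.map_cons, if_neg h, if_neg h']
      exact ih _

-- the reverse scan on a nonempty list, initial step unfolded
theorem bfold_none (a : List String) (t : List (List String)) :
    ((a :: t).foldl
      (fun acc line =>
        let name := (PySem.List.pyGet? line 2).getD ""
        match acc with
        | none => some (name, (PySem.List.pyGet? line 1).getD "")
        | some (bn, bi) =>
          if PySem.Str.len bn < PySem.Str.len name ∨
              (PySem.Str.len name = PySem.Str.len bn ∧ name < bn) then
            some (name, (PySem.List.pyGet? line 1).getD "")
          else some (bn, bi))
      (none : Option (String × String))) =
    some ((t.map pvPair).foldl (fun m x => if pvKey x.1 < pvKey m.1 then x else m) (pvPair a)) := by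
  rw [List.foldl_cons]
  exact bfold_some t (pvPair a)

-- find?-cons with the predicate explicit (keeps rewriting first-order)
theorem find?_cons_pos' {α : Type} (p : α → Bool) (x : α) (l : List α) (h : p x = true) :
    (x :: l).find? p = some x := List.find?_cons_of_pos h
theorem find?_cons_neg' {α : Type} (p : α → Bool) (x : α) (l : List α) (h : ¬ p x = true) :
    (x :: l).find? p = l.find? p := List.find?_cons_of_neg h

-- the key-min fold returns the FIRST element (accumulator first) bearing the winning name
theorem minFold_find (l : List (String × String)) (p : String × String) :
    (p :: l).find?
        (fun x => x.1 == (l.foldl (fun m x => if pvKey x.1 < pvKey m.1 then x else m) p).1) =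
      some (l.foldl (fun m x => if pvKey x.1 < pvKey m.1 then x else m) p) := by
  induction l generalizing p with
  | nil => simp
  | cons a t ih =>
    simp only [List.foldl_cons]
    set q := if pvKey a.1 < pvKey p.1 then a else p with hq
    set r := t.foldl (fun m x => if pvKey x.1 < pvKey m.1 then x else m) q with hr
    obtain ⟨-, hle, hall⟩ := minFold_spec (fun x => pvKey x.1) t q
    rw [← hr] at hle hall
    by_cases h : pvKey a.1 < pvKey p.1
    · -- q = a; p cannot bear the winning name
      have hqa : q = a := by rw [hq, if_pos h]
      have hlt : pvKey r.1 < pvKey p.1 := lt_of_le_of_lt (by rw [hqa] at hle; exact hle) h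
      have hne : ¬ ((fun x => x.1 == r.1) p = true) := by
        simp only [beq_iff_eq]
        intro hpe
        exact absurd (congrArg pvKey hpe.symm) (ne_of_lt hlt)
      have hIH := ih q
      rw [hqa] at hIH
      have hra : r = List.foldl (fun m x => if pvKey x.1 < pvKey m.1 then x else m) a t := by
        rw [hr, hqa]
      rw [← hra] at hIH
      rw [find?_cons_neg' (fun x => x.1 == r.1) p _ hne]
      exact hIH
    · -- q = p
      have hqp : q = p := by rw [hq, if_neg h]
      have hIH := ih q
      rw [hqp] at hIH
      have hra : r = List.foldl (fun m x => if pvKey x.1 < pvKey m.1 then x else m) p t := by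
        rw [hr, hqp]
      rw [← hra] at hIH
      by_cases hpm : ((fun x => x.1 == r.1) p = true)
      · have hrp : p = r := by
          rw [find?_cons_pos' (fun x => x.1 == r.1) p _ hpm] at hIH
          exact Option.some.inj hIH
        rw [find?_cons_pos' (fun x => x.1 == r.1) p _ hpm]
        rw [hrp]
      · rw [find?_cons_neg' (fun x => x.1 == r.1) p _ hpm] at hIH
        have hane : ¬ ((fun x => x.1 == r.1) a = true) := by
          simp only [beq_iff_eq]
          intro hae
          have hka : pvKey a.1 = pvKey r.1 := congrArg pvKey hae
          have hpr : pvKey p.1 ≤ pvKey a.1 := not_lt.mp h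
          have h1 : pvKey r.1 ≤ pvKey p.1 := by rw [hqp] at hle; exact hle
          have hkeq : pvKey p.1 = pvKey r.1 := le_antisymm (hka ▸ hpr) h1
          exact absurd (beq_iff_eq.mpr (pvKey_inj hkeq)) (by simpa using hpm)
        rw [find?_cons_neg' (fun x => x.1 == r.1) p _ hpm, find?_cons_neg' (fun x => x.1 == r.1) a _ hane]
        exact hIH

-- lookup in a dict built by a fold of inserts = first match in the reversed source list
theorem get?_dict (l : List (List String)) (d : PySem.Dict String String) (k : String) :
    (l.foldl (fun d line => d.insert (pvName line) (pvId line)) d).get? k =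
      (match l.reverse.find? (fun line => pvName line == k) with
        | some line => some (pvId line)
        | none => d.get? k) := by
  induction l generalizing d with
  | nil => simp
  | cons a t ih =>
    simp only [List.foldl_cons, List.reverse_cons]
    rw [ih, List.find?_append]
    cases hf : t.reverse.find? (fun line => pvName line == k) with
    | some line => simp
    | none =>
      simp only [Option.none_or]
      by_cases hk : ((fun line => pvName line == k) a = true)
      · rw [find?_cons_pos' (fun line => pvName line == k) a _ hk]
        have hke : k = pvName a := (beq_iff_eq.mp hk).symm
        subst hke
        rw [PySem.Dict.get?_insert_self]
      · rw [find?_cons_neg' (fun line => pvName line == k) a _ hk, List.find?_nil]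
        exact PySem.Dict.get?_insert_of_ne d (pvId a)
          (fun he => hk (beq_iff_eq.mpr he.symm))

-- A's three passes pick a key-minimal name of the list
theorem pick_min (names : List String) (h : names ≠ []) :
    (let M := (PySem.List.max? (names.map (fun name => PySem.Str.len name)) (fun x => x)).getD 0
     let L := names.filter (fun name => PySem.Str.len name == M)
     let r := L.foldl (fun f name => if name < f then name else f) (L.head?.getD "")
     r ∈ names ∧ ∀ y ∈ names, pvKey r ≤ pvKey y) := by
  have hne : names.map (fun name => PySem.Str.len name) ≠ [] := by
    simpa using h
  obtain ⟨M', hM'⟩ : ∃ M', PySem.List.max? (names.map (fun name => PySem.Str.len name)) (fun x => x) = some M' := by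
    cases hmx : PySem.List.max? (names.map (fun name => PySem.Str.len name)) (fun x => x) with
    | none => exact absurd ((PySem.List.max?_eq_none_iff _ _).mp hmx) hne
    | some M' => exact ⟨M', rfl⟩
  have hMmem : M' ∈ names.map (fun name => PySem.Str.len name) := PySem.List.max?_mem hM'
  have hMmax' : ∀ y ∈ names, PySem.Str.len y ≤ M' := by
    intro y hy; exact PySem.List.max?_isMax hM' _ (List.mem_map_of_mem hy)
  obtain ⟨z, hz, hzM⟩ := List.mem_map.mp hMmem
  rw [hM']
  simp only [Option.getD_some]
  set L := names.filter (fun name => PySem.Str.len name == M') with hL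
  have hmemL : ∀ y, y ∈ L ↔ (y ∈ names ∧ PySem.Str.len y = M') := by
    intro y; simp [hL, List.mem_filter]
  have hLne : L ≠ [] := by
    intro hnil
    have : z ∈ L := (hmemL z).mpr ⟨hz, hzM⟩
    rw [hnil] at this; exact absurd this (List.not_mem_nil)
  obtain ⟨a0, L', hcons⟩ := List.exists_cons_of_ne_nil hLne
  rw [hcons]
  simp only [List.head?_cons, Option.getD_some, List.foldl_cons, ite_self]
  obtain ⟨hAmem, hAle, hAall⟩ := minFold_spec (fun s => s) L' a0
  set r := L'.foldl (fun m x => if (fun s => s) x < (fun s => s) m then x else m) a0 with hr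
  have hrL : r ∈ L := by
    rw [hcons]
    rcases hAmem with h1 | h1
    · rw [h1]; exact List.mem_cons_self
    · exact List.mem_cons_of_mem _ h1
  have hrall : ∀ y ∈ L, r ≤ y := by
    intro y hy
    rw [hcons] at hy
    rcases List.mem_cons.mp hy with rfl | hy
    · exact hAle
    · exact hAall y hy
  obtain ⟨hrnames, hrlen⟩ := (hmemL r).mp hrL
  refine ⟨hrnames, ?_⟩
  intro y hy
  by_cases hlen : PySem.Str.len y = M'
  · have hyL : y ∈ L := (hmemL y).mpr ⟨hy, hlen⟩
    rcases eq_or_lt_of_le (hrall y hyL) with heq | hlt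
    · rw [heq]
    · exact le_of_lt ((pvKey_lt_iff r y).mpr (Or.inr ⟨by rw [hrlen, hlen], hlt⟩))
  · have : PySem.Str.len y < M' := lt_of_le_of_ne (hMmax' y hy) hlen
    exact le_of_lt ((pvKey_lt_iff r y).mpr (Or.inl (by omega)))

-- the two dict-building fold functions of A coincide (update with a one-pair list = insert)
theorem dict_eq (table : List (List String)) :
    (table.foldl
      (fun d line => d.update [(((PySem.List.pyGet? line 2).getD ""), ((PySem.List.pyGet? line 1).getD ""))])
      (PySem.Dict.empty : PySem.Dict String String)) =
    (table.foldl
      (fun d line => d.insert (pvName line) (pvId line))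
      PySem.Dict.empty) := by
  have hfg : (fun (d : PySem.Dict String String) (line : List String) =>
      d.update [(((PySem.List.pyGet? line 2).getD ""), ((PySem.List.pyGet? line 1).getD ""))]) =
      (fun (d : PySem.Dict String String) (line : List String) =>
      d.insert (pvName line) (pvId line)) := by
    funext d line
    simp [PySem.Dict.update, pvName, pvId]
  rw [hfg]

-- membership in the dict's keys = membership among the table's names
theorem mem_keys_iff (table : List (List String)) (y : String) :
    y ∈ (table.foldl (fun d line => d.insert (pvName line) (pvId line))
          (PySem.Dict.empty : PySem.Dict String String)).keys ↔
      y ∈ table.map pvName := by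
  rw [PySem.Dict.keys_foldl_insert_key]
  simp [PySem.Set.update_nil_left, PySem.Set.mem_ofList, PySem.Dict.keys_empty]

-- ===== VERDICT (by name: the statement is the Claim_ definition above) =====
set_option maxHeartbeats 2000000 in
theorem get_longest_name_id_spec : Claim_equal_get_longest_name_id := by
  intro table _ hPre
  unfold Spec_get_longest_name_id get_longest_name_id get_longest_name_id_alt
  rw [dict_eq]
  have hrs : table.reverse ≠ [] := by simpa using hPre.1
  obtain ⟨a, t, hat⟩ := List.exists_cons_of_ne_nil hrs
  rw [hat, bfold_none]
  dsimp only
  set D := List.foldl (fun d line => d.insert (pvName line) (pvId line)) PySem.Dict.empty table with hD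
  set rB := List.foldl (fun m x => if pvKey x.1 < pvKey m.1 then x else m) (pvPair a) (List.map pvPair t) with hrB
  -- B-side facts
  obtain ⟨hBmem0, hBle, hBall⟩ := minFold_spec (fun x => pvKey x.1) (t.map pvPair) (pvPair a)
  rw [← hrB] at hBmem0 hBle hBall
  have hBmem : rB ∈ (table.reverse).map pvPair := by
    rw [hat, List.map_cons]
    rcases hBmem0 with h1 | h1
    · rw [h1]; exact List.mem_cons_self
    · exact List.mem_cons_of_mem _ h1
  have hBnames : rB.1 ∈ table.map pvName := by
    obtain ⟨line, hl, hpl⟩ := List.mem_map.mp hBmem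
    exact List.mem_map.mpr ⟨line, List.mem_reverse.mp hl, by rw [← hpl]; rfl⟩
  have hBmin : ∀ y ∈ table.map pvName, pvKey rB.1 ≤ pvKey y := by
    intro y hy
    obtain ⟨line, hl, rfl⟩ := List.mem_map.mp hy
    have hmm : pvPair line ∈ (table.reverse).map pvPair :=
      List.mem_map.mpr ⟨line, List.mem_reverse.mpr hl, rfl⟩
    rw [hat, List.map_cons] at hmm
    rcases List.mem_cons.mp hmm with heq | hmem
    · rw [show pvName line = (pvPair line).1 from rfl, heq]
      exact hBle
    · exact hBall (pvPair line) hmem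
  -- A-side facts
  have hkeysne : D.keys ≠ [] := by
    intro hnil
    obtain ⟨l0, t0, hl0⟩ := List.exists_cons_of_ne_nil hPre.1
    have hmem0 : pvName l0 ∈ D.keys := (mem_keys_iff table _).mpr
      (List.mem_map.mpr ⟨l0, by rw [hl0]; exact List.mem_cons_self, rfl⟩)
    rw [hnil] at hmem0
    exact absurd hmem0 (List.not_mem_nil)
  obtain ⟨hAmem, hAmin⟩ := pick_min D.keys hkeysne
  have h1 := hAmin rB.1 ((mem_keys_iff table rB.1).mpr hBnames)
  have h2 := hBmin _ ((mem_keys_iff table _).mp hAmem)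
  have hEq := pvKey_inj (le_antisymm h1 h2)
  -- the winning pair is the first reverse occurrence of the winning name
  have hfind := minFold_find (t.map pvPair) (pvPair a)
  rw [← hrB] at hfind
  rw [show (pvPair a :: List.map pvPair t) = List.map pvPair (a :: t) from rfl,
    List.find?_map] at hfind
  rw [show ((fun x : String × String => x.1 == rB.1) ∘ pvPair) =
      (fun line => pvName line == rB.1) from rfl] at hfind
  obtain ⟨line, hfl, hpl⟩ : ∃ line,
      (a :: t).find? (fun line => pvName line == rB.1) = some line ∧ pvPair line = rB := by
    cases hf : (a :: t).find? (fun line => pvName line == rB.1) with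
    | none => rw [hf] at hfind; simp at hfind
    | some l => rw [hf] at hfind; exact ⟨l, rfl, Option.some.inj hfind⟩
  have hDk : D.get? rB.1 = some rB.2 := by
    rw [hD, get?_dict, hat, hfl]
    exact congrArg some (congrArg Prod.snd hpl)
  rw [hEq, hDk]
  rfl
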